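-- pv_equiv track=rewrite | github.com/novitix/FIT3155-A2 | q2/bwtzip.py | elias_encode
-- ===== SOURCE A (Python) =====
-- def num2bin(num: int) -> str:
--     res = ''
--     while num != 0:
--         res += str(num % 2)
--         num = num // 2
--     return res[::-1]
--
-- def elias_encode(num: int) -> str:
--     lengths = [num2bin(num)]
--     while True:
--         length = num2bin(len(lengths[-1])-1)
--         if length != 0 and length != '':
--             length = '0' + length[1:]
--             lengths.append(length)
--         else:
--             break
--     lengths.reverse()
--     return ''.join(lengths)
-- ===== SOURCE B (Python) =====
-- def elias_encode(num: int) -> str: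
--     # Emit the Elias-omega length components directly in output order by
--     # recursing over the length chain, instead of accumulating a list and
--     # reversing it.  format(n, 'b') is the stdlib MSB-first binary form.
--     def prefix(s: str) -> str:
--         if len(s) == 1:
--             return ''
--         c = '0' + format(len(s) - 1, 'b')[1:]
--         return prefix(c) + c
--     b = format(num, 'b')
--     return prefix(b) + b
-- ===== Notes on version B (the rewrite author's own statement) =====
-- stated objective: alternative
-- what changed: B emits the Elias-omega length components directly in output order by recursion over the length chain (prefix(b)+b), replacing A's accumulate-components-into-a-list, reverse, then join structure; B also uses the stdlib binary formatter instead of A's hand-rolled digit loop.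
import Mathlib
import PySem

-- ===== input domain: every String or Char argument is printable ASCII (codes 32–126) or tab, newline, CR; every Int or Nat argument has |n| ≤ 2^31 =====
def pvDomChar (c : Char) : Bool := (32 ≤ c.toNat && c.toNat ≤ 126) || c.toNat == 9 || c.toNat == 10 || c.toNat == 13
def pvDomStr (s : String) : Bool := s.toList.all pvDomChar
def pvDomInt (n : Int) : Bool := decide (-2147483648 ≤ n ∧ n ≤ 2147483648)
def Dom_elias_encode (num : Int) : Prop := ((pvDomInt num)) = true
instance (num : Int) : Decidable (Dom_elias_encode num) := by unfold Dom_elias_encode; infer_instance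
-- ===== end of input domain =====

-- B emits the Elias-omega components in output order via recursion over the length
-- chain instead of A's build-list/reverse/join loop (objective: alternative).


-- ===== PORT A =====
-- 'while num != 0: res += str(num % 2); num = num // 2'.  The guard 0 < num (instead of
-- num ≠ 0) is only a totality guard: for num < 0 the Python loop never terminates, and
-- such calls lie outside Pre_.
theorem num2binAux_dec (num : Int) (h : 0 < num) :
    (PySem.Int.floordiv num 2).toNat < num.toNat := by
  rw [PySem.Int.floordiv_eq_ediv_of_pos (by omega)]; omega

def num2binAux (num : Int) (res : List Char) : List Char :=
  if h : 0 < num then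
    num2binAux (PySem.Int.floordiv num 2) (res ++ PySem.Int.toChars (PySem.Int.mod num 2))
  else res
termination_by num.toNat
decreasing_by exact num2binAux_dec num h

-- num2bin: the loop above, then res[::-1]
def num2bin (num : Int) : List Char := (num2binAux num []).reverse

-- bound used by the loop's termination measure
theorem num2binAux_len_le (n : Nat) : ∀ res : List Char,
    (num2binAux (n : Int) res).length ≤ res.length + n := by
  induction n using Nat.strong_induction_on with
  | _ n ih =>
    intro res
    rw [num2binAux]
    split
    · rename_i h
      have hn : 0 < n := by exact_mod_cast h
      have h2 : PySem.Int.floordiv (n : Int) 2 = ((n / 2 : Nat) : Int) := by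
        exact_mod_cast PySem.Int.floordiv_natCast n 2
      have hm : PySem.Int.mod (n : Int) 2 = ((n % 2 : Nat) : Int) := by
        exact_mod_cast PySem.Int.mod_natCast n 2
      rw [h2, hm]
      have := ih (n / 2) (by omega) (res ++ PySem.Int.toChars ((n % 2 : Nat) : Int))
      have hd : (PySem.Int.toChars ((n % 2 : Nat) : Int)).length = 1 := by
        have : n % 2 = 0 ∨ n % 2 = 1 := by omega
        rcases this with h0 | h0 <;> simp [h0] <;> decide
      simp only [List.length_append, hd] at this
      omega
    · omega

theorem num2binAux_nonpos (n : Int) (h : n ≤ 0) : num2binAux n [] = [] := by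
  rw [num2binAux]; simp [show ¬ 0 < n by omega]

-- The while-True loop of elias_encode: lengths[-1] drives both the step and termination.
-- Python's test 'length != 0 and length != ""' compares a str with 0 (always True in
-- Python 3), so it reduces to length != ''.
theorem eliasLoop_dec (lengths : List (List Char))
    (h : num2bin (((PySem.List.pyGetD lengths (-1) ([] : List Char)).length : Int) - 1) ≠ []) :
    (PySem.List.pyGetD
        (lengths ++ ['0' :: (num2bin (((PySem.List.pyGetD lengths (-1) ([] : List Char)).length : Int) - 1)).tail])
        (-1) ([] : List Char)).length
      < (PySem.List.pyGetD lengths (-1) ([] : List Char)).length := by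
  rw [PySem.List.pyGetD_neg_one_append_singleton]
  generalize hm : (PySem.List.pyGetD lengths (-1) ([] : List Char)).length = m at h ⊢
  by_cases hl : 2 ≤ m
  · have hb : ((m : Int) - 1) = ((m - 1 : Nat) : Int) := by omega
    rw [hb] at h ⊢
    have hlen := num2binAux_len_le (m - 1) []
    simp only [List.length_nil, Nat.zero_add] at hlen
    rw [num2bin] at h ⊢
    simp only [List.length_cons]
    cases hx : (num2binAux ((m - 1 : Nat) : Int) []).reverse with
    | nil => exact absurd hx h
    | cons a t =>
      have hlx := congrArg List.length hx
      simp only [List.length_reverse, List.length_cons] at hlx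
      simp only [List.tail_cons]
      omega
  · exfalso
    apply h
    rw [num2bin, num2binAux_nonpos _ (by omega)]
    simp

def eliasLoop (lengths : List (List Char)) : List (List Char) :=
  let c := num2bin ((PySem.List.pyGetD lengths (-1) []).length - 1)
  if h : c ≠ [] then
    eliasLoop (lengths ++ ['0' :: c.tail])
  else lengths
termination_by (PySem.List.pyGetD lengths (-1) ([] : List Char)).length
decreasing_by exact eliasLoop_dec lengths h

def elias_encode (num : Int) : String :=
  let lengths := [num2bin num]
  String.ofList ((eliasLoop lengths).reverse.flatten)

-- ===== PORT B =====
-- format(n, 'b'): stdlib MSB-first binary rendering (no sign handling needed: every call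
-- inside Pre_ has n ≥ 0)
def toBin (n : Nat) : List Char :=
  if h : n < 2 then [if n = 1 then '1' else '0']
  else toBin (n / 2) ++ [if n % 2 = 1 then '1' else '0']
termination_by n
decreasing_by exact Nat.div_lt_self (by omega) (by omega)

theorem toBin_ne_nil (n : Nat) : toBin n ≠ [] := by
  rw [toBin]; split <;> simp

theorem toBin_len_le (n : Nat) (h : 1 ≤ n) : (toBin n).length ≤ n := by
  induction n using Nat.strong_induction_on with
  | _ n ih =>
    rw [toBin]
    split
    · simpa using h
    · rename_i h2
      have : (toBin (n / 2)).length ≤ n / 2 := ih (n / 2) (by omega) (by omega)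
      simp only [List.length_append, List.length_cons, List.length_nil]
      omega

-- prefix(s): the guard s.length ≤ 1 (instead of == 1) is only a totality guard; prefix
-- is never reached with an empty string.
theorem prefixFn_dec (s : List Char) (h : ¬ s.length ≤ 1) :
    ('0' :: (toBin (s.length - 1)).tail).length < s.length := by
  simp only [List.length_cons]
  have h1 : (toBin (s.length - 1)).tail.length + 1 = (toBin (s.length - 1)).length := by
    have := toBin_ne_nil (s.length - 1)
    cases hc : toBin (s.length - 1)
    · exact absurd hc this
    · simp
  have := toBin_len_le (s.length - 1) (by omega)
  omega

def prefixFn (s : List Char) : List Char :=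
  if h : s.length ≤ 1 then []
  else
    let c := '0' :: (toBin (s.length - 1)).tail
    prefixFn c ++ c
termination_by s.length
decreasing_by exact prefixFn_dec s h

def elias_encode_alt (num : Int) : String :=
  let b := toBin num.toNat
  String.ofList (prefixFn b ++ b)

-- ===== PRECONDITION & SPEC =====
-- A's num2bin loop never terminates for a negative argument, and for num = 0 the chain
-- reaches num2bin(-1); so A returns only for num ≥ 1, which Pre_ states.
def Pre_elias_encode (num : Int) : Prop := 1 ≤ num
instance (num : Int) : Decidable (Pre_elias_encode num) := by unfold Pre_elias_encode; infer_instance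
def pvWitness_elias_encode : Int := (5)
def Spec_elias_encode (num : Int) (out : String) : Prop := out = elias_encode_alt num
instance (num : Int) (out : String) : Decidable (Spec_elias_encode num out) := by unfold Spec_elias_encode; infer_instance

-- ===== CLAIM (what is proved, stated in full; the proofs are below) =====
def Claim_equal_elias_encode : Prop := ∀ (num : Int), Dom_elias_encode num → Pre_elias_encode num → Spec_elias_encode num (elias_encode num)

-- ===== LEMMAS AND PROOFS =====

-- A's digit loop computes B's stdlib binary rendering, reversed
theorem num2binAux_eq_toBin (n : Nat) (h : 1 ≤ n) :
    ∀ res : List Char, num2binAux (n : Int) res = res ++ (toBin n).reverse := by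
  induction n using Nat.strong_induction_on with
  | _ n ih =>
    intro res
    rw [num2binAux]
    have hpos : (0 : Int) < (n : Int) := by exact_mod_cast h
    rw [dif_pos hpos]
    have h2 : PySem.Int.floordiv (n : Int) 2 = ((n / 2 : Nat) : Int) := by
      exact_mod_cast PySem.Int.floordiv_natCast n 2
    have hm : PySem.Int.mod (n : Int) 2 = ((n % 2 : Nat) : Int) := by
      exact_mod_cast PySem.Int.mod_natCast n 2
    rw [h2, hm]
    have hdig : PySem.Int.toChars ((n % 2 : Nat) : Int) = [if n % 2 = 1 then '1' else '0'] := by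
      have : n % 2 = 0 ∨ n % 2 = 1 := by omega
      rcases this with h0 | h0 <;> simp [h0] <;> decide
    rw [hdig]
    by_cases hsmall : n < 2
    · have hn1 : n = 1 := by omega
      subst hn1
      rw [num2binAux]
      norm_num
      rw [toBin]
      norm_num
    · have := ih (n / 2) (by omega) (by omega) (res ++ [if n % 2 = 1 then '1' else '0'])
      rw [this]
      conv_rhs => rw [toBin, dif_neg (by omega)]
      simp

theorem num2bin_eq_toBin (n : Nat) (h : 1 ≤ n) : num2bin (n : Int) = toBin n := by
  rw [num2bin, num2binAux_eq_toBin n h []]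
  simp

-- main loop lemma: the joined reversed component list is prefix(s) ++ s
theorem eliasLoop_flatten (n : Nat) : ∀ s : List Char, s.length = n → ∀ L : List (List Char),
    (eliasLoop (L ++ [s])).reverse.flatten = (prefixFn s ++ s) ++ L.reverse.flatten := by
  induction n using Nat.strong_induction_on with
  | _ n ih =>
    intro s hs L
    rw [eliasLoop]
    simp only [PySem.List.pyGetD_neg_one_append_singleton]
    by_cases hlen : s.length ≤ 1
    · have hc : num2bin ((s.length : Int) - 1) = [] := by
        rw [num2bin, num2binAux_nonpos _ (by omega)]; simp
      rw [dif_neg (by simp [hc])]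
      rw [prefixFn, dif_pos hlen]
      simp
    · have hb : ((s.length : Int) - 1) = ((s.length - 1 : Nat) : Int) := by omega
      have hc : num2bin ((s.length : Int) - 1) = toBin (s.length - 1) := by
        rw [hb]; exact num2bin_eq_toBin _ (by omega)
      rw [dif_pos (by rw [hc]; exact toBin_ne_nil _)]
      set cf := '0' :: (num2bin ((s.length : Int) - 1)).tail with hcf
      have hcf' : cf = '0' :: (toBin (s.length - 1)).tail := by rw [hcf, hc]
      have hcflen : cf.length < n := by
        rw [hcf']
        simp only [List.length_cons]
        have h1 : (toBin (s.length - 1)).tail.length + 1 = (toBin (s.length - 1)).length := by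
          have := toBin_ne_nil (s.length - 1)
          cases hx : toBin (s.length - 1)
          · exact absurd hx this
          · simp
        have := toBin_len_le (s.length - 1) (by omega)
        omega
      have happ : L ++ [s] ++ [cf] = (L ++ [s]) ++ [cf] := by simp
      rw [happ, ih cf.length hcflen cf rfl (L ++ [s])]
      conv_rhs => rw [prefixFn, dif_neg hlen]
      simp [hcf']
    
theorem elias_encode_spec : Claim_equal_elias_encode := by
  intro num _ hpre
  have hp : 1 ≤ num := hpre
  unfold Spec_elias_encode
  have hn : num = ((num.toNat : Nat) : Int) := by omega
  have h1 : 1 ≤ num.toNat := by omega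
  have hb : num2bin num = toBin num.toNat := by
    rw [hn]; exact num2bin_eq_toBin _ h1
  have key := eliasLoop_flatten (num2bin num).length (num2bin num) rfl []
  simp only [List.nil_append, List.reverse_nil, List.flatten_nil, List.append_nil] at key
  show String.ofList ((eliasLoop [num2bin num]).reverse.flatten)
      = String.ofList (prefixFn (toBin num.toNat) ++ toBin num.toNat)
  rw [key, hb]
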